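-- pv_equiv track=rewrite | github.com/MCCMDave/kitchenhelper-ai | scripts/i18n-auto-translate.py | build_js_lang_section
-- ===== SOURCE A (Python) =====
-- def build_js_lang_section(translations, indent=8):
--     """Erstellt eine JS-Sprach-Sektion aus Übersetzungen"""
--     lines = []
--     current_category = None
--
--     for key in sorted(translations.keys()):
--         value = translations[key]
--
--         # Kategorie-Kommentar hinzufügen
--         category = key.split('.')[0]
--         if category != current_category:
--             if current_category is not None:
--                 lines.append('')
--             lines.append(f"// {category.capitalize()}")
--             current_category = category
--
--         # Escape single quotes in value
--         value = value.replace("'", "\\'").replace("\n", "\\n")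
--
--         lines.append(f"'{key}': '{value}',")
--
--     # Indent
--     indent_str = ' ' * indent
--     return '\n'.join(indent_str + line for line in lines)
-- ===== SOURCE B (Python) =====
-- def build_js_lang_section(translations, indent=8):
--     """Group-first rebuild: partition sorted keys into category runs, render each
--     category block, then join blocks with a separator line of indent spaces."""
--     pad = ' ' * indent
--     keys = sorted(translations)
--     blocks = []
--     i = 0
--     while i < len(keys):
--         cat = keys[i].split('.')[0]
--         j = i
--         while j < len(keys) and keys[j].split('.')[0] == cat:
--             j += 1
--         lines = ["// " + cat.capitalize()] + [
--             "'%s': '%s'," % (k, translations[k].replace("'", "\\'").replace("\n", "\\n"))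
--             for k in keys[i:j]
--         ]
--         blocks.append('\n'.join(pad + line for line in lines))
--         i = j
--     return ('\n' + pad + '\n').join(blocks)
-- ===== Notes on version B (the rewrite author's own statement) =====
-- stated objective: alternative
-- what changed: B partitions the sorted keys into category runs up front and renders each category as a self-contained block joined by an indent-spaces separator line, replacing A's single per-key loop that tracks current_category state.
import Mathlib
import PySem

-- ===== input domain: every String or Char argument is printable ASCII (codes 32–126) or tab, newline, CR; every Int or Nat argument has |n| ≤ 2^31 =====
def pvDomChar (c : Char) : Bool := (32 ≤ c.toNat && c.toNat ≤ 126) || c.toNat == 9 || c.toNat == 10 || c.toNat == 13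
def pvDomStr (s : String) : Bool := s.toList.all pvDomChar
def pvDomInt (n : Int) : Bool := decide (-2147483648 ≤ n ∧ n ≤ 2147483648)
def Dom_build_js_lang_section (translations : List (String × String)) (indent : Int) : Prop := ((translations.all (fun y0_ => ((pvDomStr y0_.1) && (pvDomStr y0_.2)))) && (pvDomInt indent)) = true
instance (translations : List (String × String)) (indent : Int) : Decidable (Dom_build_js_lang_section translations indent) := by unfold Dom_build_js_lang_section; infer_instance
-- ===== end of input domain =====

-- B rebuilds the section group-first (category runs of the sorted keys, rendered as blocks
-- joined by a separator line of indent spaces) instead of A's per-key loop with category state;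
-- objective: alternative decomposition, same cost.

-- shared rendering helpers (identical text fragments in both Pythons)
def pvCat (k : List Char) : List Char := (PySem.Chars.splitOn k ['.']).headD []

def pvCap (c : List Char) : List Char :=
  match c with
  | [] => []
  | x :: xs => PySem.Chars.upperChar x :: xs.map PySem.Chars.lowerChar

def pvCapLine (c : List Char) : List Char := '/' :: '/' :: ' ' :: pvCap c

def pvEsc (v : List Char) : List Char :=
  PySem.Chars.replace (PySem.Chars.replace v ['\''] ['\\', '\'']) ['\n'] ['\\', 'n']

def pvEntry (k v : List Char) : List Char :=
  '\'' :: k ++ '\'' :: ':' :: ' ' :: '\'' :: pvEsc v ++ ['\'', ',']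

def pvPad (indent : Int) : List Char := List.replicate indent.toNat ' '

-- ===== PORT A =====
-- one iteration of A's loop; state = (lines, current_category); the key comes from the
-- dict's own keys, so the getD default "" is never consulted (translations[key] cannot raise)
def pvStepA (d : PySem.Dict String String) (st : List (List Char) × Option (List Char))
    (key : String) : List (List Char) × Option (List Char) :=
  let value := (PySem.Dict.getD d key "").toList
  let category := pvCat key.toList
  let (lines, cur) :=
    if some category ≠ st.2 then
      ((if st.2 ≠ none then st.1 ++ [[]] else st.1) ++ [pvCapLine category], some category)
    else (st.1, st.2)
  (lines ++ [pvEntry key.toList value], cur)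

def build_js_lang_section (translations : List (String × String)) (indent : Int) : String :=
  String.ofList (PySem.Chars.join ['\n']
    ((((PySem.List.sorted (PySem.Dict.ofList translations).keys (fun k => k) false).foldl
        (pvStepA (PySem.Dict.ofList translations)) ([], none)).1).map
      (fun line => pvPad indent ++ line)))

-- ===== PORT B =====
def pvEntryOf (d : PySem.Dict String String) (k : String) : List Char :=
  pvEntry k.toList (PySem.Dict.getD d k "").toList

-- the runs of equal category in the sorted key list (Source B's inner while-j scan)
def pvRuns : List String → List (List Char × List String)
  | [] => []
  | k :: rest =>
    (pvCat k.toList, k :: rest.takeWhile (fun j => pvCat j.toList == pvCat k.toList)) ::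
      pvRuns (rest.dropWhile (fun j => pvCat j.toList == pvCat k.toList))
  termination_by l => l.length
  decreasing_by
    exact Nat.lt_succ_of_le (List.length_dropWhile_le _ _)

-- one rendered category block (header line + entry lines, indented and joined)
def pvBlock (d : PySem.Dict String String) (pad : List Char) (g : List Char × List String) :
    List Char :=
  PySem.Chars.join ['\n']
    ((pvCapLine g.1 :: g.2.map (pvEntryOf d)).map (fun line => pad ++ line))

def build_js_lang_section_alt (translations : List (String × String)) (indent : Int) : String :=
  String.ofList (PySem.Chars.join ('\n' :: pvPad indent ++ ['\n'])
    ((pvRuns (PySem.List.sorted (PySem.Dict.ofList translations).keys (fun k => k) false)).map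
      (pvBlock (PySem.Dict.ofList translations) (pvPad indent))))

-- ===== PRECONDITION & SPEC =====
def Spec_build_js_lang_section (translations : List (String × String)) (indent : Int) (out : String) : Prop := out = build_js_lang_section_alt translations indent
instance (translations : List (String × String)) (indent : Int) (out : String) : Decidable (Spec_build_js_lang_section translations indent out) := by unfold Spec_build_js_lang_section; infer_instance

-- ===== CLAIM (what is proved, stated in full; the proofs are below) =====
def Claim_equal_build_js_lang_section : Prop := ∀ (translations : List (String × String)) (indent : Int), Dom_build_js_lang_section translations indent → Spec_build_js_lang_section translations indent (build_js_lang_section translations indent)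

-- ===== LEMMAS AND PROOFS =====

theorem pvRuns_cons (k : String) (rest : List String) :
    pvRuns (k :: rest) =
      (pvCat k.toList, k :: rest.takeWhile (fun j => pvCat j.toList == pvCat k.toList)) ::
        pvRuns (rest.dropWhile (fun j => pvCat j.toList == pvCat k.toList)) := by
  conv_lhs => unfold pvRuns

theorem pvRuns_nil : pvRuns [] = [] := by conv_lhs => unfold pvRuns

-- the line list A's loop produces, described group-first: blocks separated by an empty line
def pvEmit (d : PySem.Dict String String) : List (List Char × List String) → List (List Char)
  | [] => []
  | [(c, g)] => pvCapLine c :: g.map (pvEntryOf d)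
  | (c, g) :: gs => (pvCapLine c :: g.map (pvEntryOf d)) ++ [[]] ++ pvEmit d gs

theorem dropWhile_head_false {α : Type} (p : α → Bool) (l : List α) (j : α) (t : List α)
    (h : l.dropWhile p = j :: t) : p j = false := by
  induction l with
  | nil => simp at h
  | cons a l ih =>
    rw [List.dropWhile_cons] at h
    split at h
    · exact ih h
    · next hp => cases h; simpa using hp

theorem foldl_stepA_same (d : PySem.Dict String String) (g : List String) (c : List Char)
    (lines : List (List Char)) (h : ∀ k ∈ g, pvCat k.toList = c) :
    g.foldl (pvStepA d) (lines, some c) = (lines ++ g.map (pvEntryOf d), some c) := by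
  induction g generalizing lines with
  | nil => simp
  | cons k g ih =>
    have hk : pvCat k.toList = c := h k (by simp)
    have hstep : pvStepA d (lines, some c) k = (lines ++ [pvEntryOf d k], some c) := by
      simp [pvStepA, hk, pvEntryOf]
    rw [List.foldl_cons, hstep,
      ih (lines ++ [pvEntryOf d k]) (fun j hj => h j (List.mem_cons_of_mem _ hj))]
    simp

theorem pvEmit_cons (d : PySem.Dict String String) (c : List Char) (g : List String)
    (gs : List (List Char × List String)) :
    pvEmit d ((c, g) :: gs) =
      (pvCapLine c :: g.map (pvEntryOf d)) ++
        (if gs.isEmpty then [] else [[]] ++ pvEmit d gs) := by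
  cases gs with
  | nil => simp [pvEmit]
  | cons g' gs' => simp [pvEmit]

theorem pvRuns_nil_iff (ks : List String) : pvRuns ks = [] ↔ ks = [] := by
  cases ks with
  | nil => simp [pvRuns_nil]
  | cons k rest => rw [pvRuns_cons]; simp

theorem foldl_stepA_emit (d : PySem.Dict String String) :
    ∀ (n : Nat) (ks : List String) (lines : List (List Char)) (cur : Option (List Char)),
    ks.length ≤ n →
    (∀ k0, ks.head? = some k0 → cur ≠ some (pvCat k0.toList)) →
    (ks.foldl (pvStepA d) (lines, cur)).1 =
      lines ++ (if ks.isEmpty then [] else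
        (if cur.isSome then [[]] else []) ++ pvEmit d (pvRuns ks)) := by
  intro n
  induction n with
  | zero =>
    intro ks lines cur hn _
    have : ks = [] := List.length_eq_zero_iff.mp (Nat.le_zero.mp hn)
    subst this; simp
  | succ n ih =>
    intro ks lines cur hn hhead
    cases ks with
    | nil => simp
    | cons k rest =>
      have hne : cur ≠ some (pvCat k.toList) := hhead k rfl
      set c := pvCat k.toList with hc
      set p : String → Bool := fun j => pvCat j.toList == c with hp
      -- first iteration: category changes, header (and separator if not first) emitted
      have hstep : pvStepA d (lines, cur) k =
          ((if cur ≠ none then lines ++ [[]] else lines) ++ [pvCapLine c] ++ [pvEntryOf d k],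
            some c) := by
        simp only [pvStepA, ← hc]
        rw [if_pos (by simpa [eq_comm] using hne)]
        simp [pvEntryOf]
      rw [List.foldl_cons, hstep]
      -- split the rest into the remainder of this run and the later keys
      have hsplit : rest = rest.takeWhile p ++ rest.dropWhile p :=
        (List.takeWhile_append_dropWhile).symm
      have hfold : rest.foldl (pvStepA d)
            ((if cur ≠ none then lines ++ [[]] else lines) ++ [pvCapLine c] ++ [pvEntryOf d k],
              some c) =
          (rest.dropWhile p).foldl (pvStepA d)
            ((if cur ≠ none then lines ++ [[]] else lines) ++ [pvCapLine c] ++ [pvEntryOf d k]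
              ++ (rest.takeWhile p).map (pvEntryOf d), some c) := by
        conv_lhs => rw [hsplit]
        rw [List.foldl_append, foldl_stepA_same d _ c _ (fun j hj => by
          have := List.mem_takeWhile_imp hj
          simpa [hp] using this)]
      rw [hfold]
      have hlen : (rest.dropWhile p).length ≤ n := by
        have h1 := List.length_dropWhile_le p rest
        have h2 : rest.length ≤ n := by simpa using Nat.le_of_succ_le_succ hn
        omega
      have hhead' : ∀ k0, (rest.dropWhile p).head? = some k0 →
          (some c : Option (List Char)) ≠ some (pvCat k0.toList) := by
        intro k0 h0
        cases hdw : rest.dropWhile p with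
        | nil => rw [hdw] at h0; simp at h0
        | cons a t =>
          rw [hdw] at h0
          simp only [List.head?_cons, Option.some.injEq] at h0
          subst h0
          have := dropWhile_head_false p rest a t hdw
          simp only [hp, beq_eq_false_iff_ne, ne_eq] at this
          simpa [eq_comm] using this
      rw [ih (rest.dropWhile p) _ (some c) hlen hhead']
      rw [pvRuns_cons, ← hc, ← hp, pvEmit_cons]
      have hie : (pvRuns (rest.dropWhile p)).isEmpty = (rest.dropWhile p).isEmpty := by
        cases hdw : rest.dropWhile p with
        | nil => simp [pvRuns_nil]
        | cons a t => simp [pvRuns_nil_iff]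
      rw [hie]
      cases cur with
      | none =>
        cases hdw : rest.dropWhile p with
        | nil => simp
        | cons a t => simp
      | some c' =>
        cases hdw : rest.dropWhile p with
        | nil => simp
        | cons a t => simp

theorem join_append (sep : List Char) (xs ys : List (List Char)) (hx : xs ≠ []) (hy : ys ≠ []) :
    PySem.Chars.join sep (xs ++ ys) =
      PySem.Chars.join sep xs ++ sep ++ PySem.Chars.join sep ys := by
  induction xs with
  | nil => exact absurd rfl hx
  | cons x xs ih =>
    cases xs with
    | nil =>
      cases ys with
      | nil => exact absurd rfl hy
      | cons y ys => simp [PySem.Chars.join_cons_cons, PySem.Chars.join_singleton]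
    | cons x' xs' =>
      have := ih (by simp)
      simp only [List.cons_append] at this ⊢
      rw [PySem.Chars.join_cons_cons, PySem.Chars.join_cons_cons, this]
      simp

theorem pvEmit_ne_nil (d : PySem.Dict String String) (g : List Char × List String)
    (gs : List (List Char × List String)) : pvEmit d (g :: gs) ≠ [] := by
  obtain ⟨c, ks⟩ := g
  cases gs with
  | nil => simp [pvEmit]
  | cons g' gs' => simp [pvEmit]

theorem join_emit (d : PySem.Dict String String) (pad : List Char) :
    ∀ gs : List (List Char × List String),
    PySem.Chars.join ['\n'] ((pvEmit d gs).map (fun l => pad ++ l)) =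
      PySem.Chars.join ('\n' :: pad ++ ['\n']) (gs.map (pvBlock d pad)) := by
  intro gs
  induction gs with
  | nil => simp [pvEmit, PySem.Chars.join_nil]
  | cons g gs ih =>
    obtain ⟨c, ks⟩ := g
    cases gs with
    | nil => simp [pvEmit, pvBlock, PySem.Chars.join_singleton]
    | cons g' gs' =>
      have hemit : pvEmit d ((c, ks) :: g' :: gs') =
          (pvCapLine c :: ks.map (pvEntryOf d)) ++ ([[]] ++ pvEmit d (g' :: gs')) := by
        simp [pvEmit]
      have hmap : ([[]] ++ pvEmit d (g' :: gs')).map (fun l => pad ++ l) =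
          [pad] ++ (pvEmit d (g' :: gs')).map (fun l => pad ++ l) := by simp
      rw [hemit, List.map_append, join_append ['\n'] _ _ (by simp) (by simp), hmap,
        join_append ['\n'] [pad] _ (by simp) (by simpa using pvEmit_ne_nil d g' gs'),
        PySem.Chars.join_singleton, ih]
      have hrhs : List.map (pvBlock d pad) ((c, ks) :: g' :: gs')
          = pvBlock d pad (c, ks) :: pvBlock d pad g' :: List.map (pvBlock d pad) gs' := rfl
      rw [hrhs, PySem.Chars.join_cons_cons]
      simp [pvBlock, List.append_assoc]

theorem ports_eq (translations : List (String × String)) (indent : Int) :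
    build_js_lang_section translations indent = build_js_lang_section_alt translations indent := by
  unfold build_js_lang_section build_js_lang_section_alt
  have hlines : ∀ ks : List String,
      (ks.foldl (pvStepA (PySem.Dict.ofList translations)) ([], none)).1 =
        pvEmit (PySem.Dict.ofList translations) (pvRuns ks) := by
    intro ks
    rw [foldl_stepA_emit (PySem.Dict.ofList translations) ks.length ks [] none (le_refl _)
      (by simp)]
    cases hk : ks with
    | nil => simp [pvRuns_nil, pvEmit]
    | cons k rest => simp
  rw [hlines, join_emit]

-- ===== VERDICT (by name: the statement is the Claim_ definition above) =====
theorem build_js_lang_section_spec : Claim_equal_build_js_lang_section := by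
  intro translations indent _
  unfold Spec_build_js_lang_section
  exact ports_eq translations indent
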